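-- pv_equiv track=rewrite | github.com/squaeragent/getzero-os | scanner/agents/signal_harvester.py | classify_signal_style
-- ===== SOURCE A (Python) =====
-- MOMENTUM_KEYWORDS = {"TREND", "MOMENTUM", "EMA", "BREAKOUT", "MACD", "CROSS"}
--
-- REVERSAL_KEYWORDS = {"REVERSAL", "REVERT", "RSI", "BB", "BOUNCE", "OVERSOLD", "OVERBOUGHT", "DOJI"}
--
-- def classify_signal_style(signal_name):
--     """Classify a signal as momentum-style or reversal-style based on its name."""
--     upper = signal_name.upper()
--     momentum_score = sum(1 for kw in MOMENTUM_KEYWORDS if kw in upper)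
--     reversal_score = sum(1 for kw in REVERSAL_KEYWORDS if kw in upper)
--     if momentum_score > reversal_score:
--         return "momentum"
--     if reversal_score > momentum_score:
--         return "reversal"
--     return "neutral"
-- ===== SOURCE B (Python) =====
-- # B: position-driven multi-pattern text scan. Instead of A's per-keyword "kw in upper"
-- # membership sums, B walks the uppercased name once position by position, matching
-- # keywords that start at each position, recording each keyword at most once in a set,
-- # and accumulating a signed net score whose sign decides the class.
-- KEYWORD_WEIGHTS = {
--     "TREND": 1, "MOMENTUM": 1, "EMA": 1, "BREAKOUT": 1, "MACD": 1, "CROSS": 1,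
--     "REVERSAL": -1, "REVERT": -1, "RSI": -1, "BB": -1, "BOUNCE": -1,
--     "OVERSOLD": -1, "OVERBOUGHT": -1, "DOJI": -1,
-- }
--
-- def classify_signal_style(signal_name):
--     upper = signal_name.upper()
--     net = 0
--     matched = set()
--     for i in range(len(upper)):
--         for kw, w in KEYWORD_WEIGHTS.items():
--             if kw not in matched and upper.startswith(kw, i):
--                 matched.add(kw)
--                 net += w
--     return "momentum" if net > 0 else "reversal" if net < 0 else "neutral"
-- ===== Notes on version B (the rewrite author's own statement) =====
-- stated objective: alternative
-- what changed: Replaces A's per-keyword substring-membership sums by a position-driven multi-pattern scan: one walk over the uppercased name that matches keywords starting at each position, dedups them in a set, and accumulates one signed net score.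
import Mathlib
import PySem

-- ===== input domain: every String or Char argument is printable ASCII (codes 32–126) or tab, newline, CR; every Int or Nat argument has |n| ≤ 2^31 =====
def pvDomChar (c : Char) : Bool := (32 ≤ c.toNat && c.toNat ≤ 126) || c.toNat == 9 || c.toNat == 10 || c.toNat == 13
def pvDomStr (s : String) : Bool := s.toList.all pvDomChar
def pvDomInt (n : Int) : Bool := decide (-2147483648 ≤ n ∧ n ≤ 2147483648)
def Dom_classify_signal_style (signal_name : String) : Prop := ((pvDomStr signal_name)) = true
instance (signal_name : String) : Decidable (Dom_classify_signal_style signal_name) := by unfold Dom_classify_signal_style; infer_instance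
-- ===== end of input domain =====

-- ===== PORT A =====
-- B replaces A's per-keyword substring-membership sums with a single position-by-position
-- multi-pattern scan of the name (alternative algorithm, same classification).
def MOMENTUM_KEYWORDS : List String :=
  ["TREND", "MOMENTUM", "EMA", "BREAKOUT", "MACD", "CROSS"]

def REVERSAL_KEYWORDS : List String :=
  ["REVERSAL", "REVERT", "RSI", "BB", "BOUNCE", "OVERSOLD", "OVERBOUGHT", "DOJI"]

def classify_signal_style (signal_name : String) : String :=
  let upper := PySem.Str.upper signal_name
  let momentum_score : Int :=
    MOMENTUM_KEYWORDS.foldl (fun acc kw => if PySem.Str.isIn kw upper then acc + 1 else acc) 0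
  let reversal_score : Int :=
    REVERSAL_KEYWORDS.foldl (fun acc kw => if PySem.Str.isIn kw upper then acc + 1 else acc) 0
  if momentum_score > reversal_score then "momentum"
  else if reversal_score > momentum_score then "reversal"
  else "neutral"

-- ===== PORT B =====
def KEYWORD_WEIGHTS : List (String × Int) :=
  [("TREND", 1), ("MOMENTUM", 1), ("EMA", 1), ("BREAKOUT", 1), ("MACD", 1), ("CROSS", 1),
   ("REVERSAL", -1), ("REVERT", -1), ("RSI", -1), ("BB", -1), ("BOUNCE", -1),
   ("OVERSOLD", -1), ("OVERBOUGHT", -1), ("DOJI", -1)]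

-- upper.startswith(kw, i) for 0 ≤ i: exact — Python compares kw with upper[i:i+len(kw)].
def pvStartsAt (kw : String) (u : List Char) (i : Nat) : Bool :=
  kw.toList.isPrefixOf (u.drop i)

-- body of B's inner loop over the keyword dict at position i: state = (matched set, net)
def pvScanKw (u : List Char) (i : Nat) (st : PySem.Set String × Int) (p : String × Int) :
    PySem.Set String × Int :=
  if !(PySem.Set.contains st.1 p.1) && pvStartsAt p.1 u i then
    (PySem.Set.add st.1 p.1, st.2 + p.2)
  else st

def classify_signal_style_alt (signal_name : String) : String :=
  let upper := PySem.Str.upper signal_name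
  let u := upper.toList
  let st :=
    (List.range u.length).foldl
      (fun st i => KEYWORD_WEIGHTS.foldl (pvScanKw u i) st)
      ((PySem.Set.empty : PySem.Set String), (0 : Int))
  if st.2 > 0 then "momentum" else if st.2 < 0 then "reversal" else "neutral"

-- ===== PRECONDITION & SPEC =====
def Spec_classify_signal_style (signal_name : String) (out : String) : Prop := out = classify_signal_style_alt signal_name
instance (signal_name : String) (out : String) : Decidable (Spec_classify_signal_style signal_name out) := by unfold Spec_classify_signal_style; infer_instance

-- ===== CLAIM (what is proved, stated in full; the proofs are below) =====
def Claim_equal_classify_signal_style : Prop := ∀ (signal_name : String), Dom_classify_signal_style signal_name → Spec_classify_signal_style signal_name (classify_signal_style signal_name)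

-- ===== LEMMAS AND PROOFS =====

theorem pv_contains_add (m : PySem.Set String) (x s : String) :
    PySem.Set.contains (PySem.Set.add m x) s = (PySem.Set.contains m s || s == x) := by
  by_cases hx : PySem.Set.contains m x = true
  · rw [PySem.Set.add, if_pos hx]
    by_cases hsx : s = x
    · subst hsx
      rw [hx, Bool.true_or]
    · have : (s == x) = false := by simp [hsx]
      rw [this, Bool.or_false]
  · rw [PySem.Set.add, if_neg hx]
    by_cases hsx : s = x <;>
      simp [PySem.Set.contains_eq_listContains, hsx]

-- kw was matched at one of the first n positions of u
def pvHit (kw : String) (u : List Char) (n : Nat) : Bool :=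
  (List.range n).any (fun i => pvStartsAt kw u i)

theorem pv_sum_map_add (L : List (String × Int)) (f g : String × Int → Int) :
    (L.map f).sum + (L.map g).sum = (L.map (fun p => f p + g p)).sum := by
  induction L with
  | nil => simp
  | cons p t ih => simp only [List.map_cons, List.sum_cons]; rw [← ih]; ring

theorem pv_any_factor (L : List (String × Int)) (s : String) (u : List Char) (i : Nat) :
    L.any (fun p => p.1 == s && pvStartsAt p.1 u i)
      = (L.any (fun p => p.1 == s) && pvStartsAt s u i) := by
  induction L with
  | nil => simp
  | cons p t ih =>
    simp only [List.any_cons, ih]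
    by_cases h : p.1 = s
    · subst h; cases hpv : pvStartsAt p.1 u i <;> simp
    · have : (p.1 == s) = false := by simp [h]
      simp [this]

-- invariant of B's inner loop over the keyword list at one position i
theorem pv_inner (u : List Char) (i : Nat) (L : List (String × Int))
    (hL : (L.map Prod.fst).Nodup) (m : PySem.Set String) (net : Int) (q : String → Bool)
    (hm : ∀ s, PySem.Set.contains m s = q s) :
    (∀ s, PySem.Set.contains (L.foldl (pvScanKw u i) (m, net)).1 s
       = (q s || L.any (fun p => p.1 == s && pvStartsAt p.1 u i))) ∧
    (L.foldl (pvScanKw u i) (m, net)).2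
       = net + (L.map (fun p => if !(q p.1) && pvStartsAt p.1 u i then p.2 else 0)).sum := by
  induction L generalizing m net q with
  | nil =>
    constructor
    · intro s
      simp only [List.foldl_nil, List.any_nil, Bool.or_false]
      exact hm s
    · simp
  | cons p t ih =>
    obtain ⟨k, w⟩ := p
    simp only [List.map_cons, List.nodup_cons] at hL
    obtain ⟨hk, ht⟩ := hL
    have hkt : ∀ r ∈ t, (k == r.1) = false := by
      intro r hr
      have : r.1 ∈ t.map Prod.fst := List.mem_map_of_mem hr
      simp only [beq_eq_false_iff_ne]
      intro hkr; exact hk (hkr ▸ this)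
    have hq' :
        (t.map (fun p => if !((fun s => q s || (k == s && pvStartsAt k u i)) p.1)
            && pvStartsAt p.1 u i then p.2 else 0))
          = (t.map (fun p => if !(q p.1) && pvStartsAt p.1 u i then p.2 else 0)) :=
      List.map_congr_left (fun r hr => by
        simp only [hkt r hr, Bool.false_and, Bool.or_false])
    simp only [List.foldl_cons, List.any_cons, List.map_cons, List.sum_cons]
    by_cases hqk : q k = true
    · -- already matched: step is a no-op
      have hstep : pvScanKw u i (m, net) (k, w) = (m, net) := by
        unfold pvScanKw
        simp only [hm, hqk, Bool.not_true, Bool.false_and, Bool.false_eq_true, if_false]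
      rw [hstep]
      have hm' : ∀ s, PySem.Set.contains m s = (q s || (k == s && pvStartsAt k u i)) := by
        intro s
        by_cases hks : k = s
        · subst hks
          simp only [hm, hqk, Bool.true_or]
        · have hne : (k == s) = false := by simp [hks]
          simp only [hm, hne, Bool.false_and, Bool.or_false]
      obtain ⟨ihc, ihn⟩ := ih ht m net _ hm'
      refine ⟨fun s => by rw [ihc s, Bool.or_assoc], ?_⟩
      rw [ihn, hq', hqk]
      simp only [Bool.not_true, Bool.false_and, Bool.false_eq_true, if_false]
      ring
    · have hqk' : q k = false := by simpa using hqk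
      by_cases hs : pvStartsAt k u i = true
      · -- new match: add k to the set and its weight to the net
        have hstep : pvScanKw u i (m, net) (k, w) = (PySem.Set.add m k, net + w) := by
          unfold pvScanKw
          simp only [hm, hqk', hs, Bool.not_false, Bool.true_and, if_true]
        rw [hstep]
        have hm' : ∀ s, PySem.Set.contains (PySem.Set.add m k) s
            = (q s || (k == s && pvStartsAt k u i)) := by
          intro s
          rw [pv_contains_add, hm, hs, Bool.and_true]
          by_cases hks : k = s
          · subst hks; simp
          · have h1 : (k == s) = false := by simp [hks]
            have h2 : (s == k) = false := by simp [Ne.symm hks]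
            rw [h1, h2]
        obtain ⟨ihc, ihn⟩ := ih ht _ _ _ hm'
        refine ⟨fun s => by rw [ihc s, Bool.or_assoc], ?_⟩
        rw [ihn, hq', hqk', hs]
        simp only [Bool.not_false, Bool.true_and, if_true]
        ring
      · -- keyword does not start here: no-op
        have hs' : pvStartsAt k u i = false := by simpa using hs
        have hstep : pvScanKw u i (m, net) (k, w) = (m, net) := by
          unfold pvScanKw
          simp only [hs', Bool.and_false, Bool.false_eq_true, if_false]
        rw [hstep]
        have hm' : ∀ s, PySem.Set.contains m s = (q s || (k == s && pvStartsAt k u i)) := by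
          intro s; rw [hs', Bool.and_false, Bool.or_false, hm]
        obtain ⟨ihc, ihn⟩ := ih ht m net _ hm'
        refine ⟨fun s => by rw [ihc s, Bool.or_assoc], ?_⟩
        rw [ihn, hq', hs']
        simp only [Bool.and_false, Bool.false_eq_true, if_false]
        ring

-- invariant of B's outer loop over the first n positions
theorem pv_outer (u : List Char) (n : Nat) :
    (∀ s, PySem.Set.contains
        ((List.range n).foldl (fun st i => KEYWORD_WEIGHTS.foldl (pvScanKw u i) st)
          ((PySem.Set.empty : PySem.Set String), (0 : Int))).1 s
       = (KEYWORD_WEIGHTS.any (fun p => p.1 == s) && pvHit s u n)) ∧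
    ((List.range n).foldl (fun st i => KEYWORD_WEIGHTS.foldl (pvScanKw u i) st)
          ((PySem.Set.empty : PySem.Set String), (0 : Int))).2
       = (KEYWORD_WEIGHTS.map (fun p => if pvHit p.1 u n then p.2 else 0)).sum := by
  induction n with
  | zero => constructor <;> simp [pvHit, PySem.Set.empty, PySem.Set.contains_eq_listContains]
  | succ n ihn =>
    obtain ⟨ihc, ihs⟩ := ihn
    rw [List.range_succ]
    simp only [List.foldl_append, List.foldl_cons, List.foldl_nil]
    have hnd : (KEYWORD_WEIGHTS.map Prod.fst).Nodup := by decide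
    obtain ⟨hc, hn⟩ := pv_inner u n KEYWORD_WEIGHTS hnd _ _
      (fun s => KEYWORD_WEIGHTS.any (fun p => p.1 == s) && pvHit s u n) ihc
    have hhit : ∀ s, pvHit s u (n + 1) = (pvHit s u n || pvStartsAt s u n) := by
      intro s
      simp [pvHit, List.range_succ]
    constructor
    · intro s
      rw [hc s, pv_any_factor, hhit s, Bool.and_or_distrib_left]
    · rw [hn, ihs, pv_sum_map_add]
      refine congrArg List.sum (List.map_congr_left (fun r hr => ?_))
      have hmem : KEYWORD_WEIGHTS.any (fun p => p.1 == r.1) = true := by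
        simp only [List.any_eq_true]
        exact ⟨r, hr, by simp⟩
      rw [hhit r.1, hmem, Bool.true_and]
      cases h1 : pvHit r.1 u n <;> cases h2 : pvStartsAt r.1 u n <;> simp

-- a nonempty keyword is hit somewhere in the position scan iff it is a substring
theorem pv_hit_eq (kw : String) (u : List Char) (h : kw.toList ≠ []) :
    pvHit kw u u.length = PySem.Chars.isIn kw.toList u := by
  rw [Bool.eq_iff_iff, ← PySem.Chars.exists_prefix_drop_iff_isIn]
  simp only [pvHit, List.any_eq_true, List.mem_range, pvStartsAt, List.isPrefixOf_iff_prefix]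
  constructor
  · rintro ⟨i, _, hp⟩; exact ⟨i, hp⟩
  · rintro ⟨j, hp⟩
    refine ⟨j, ?_, hp⟩
    have h1 := hp.length_le
    have h2 : 0 < kw.toList.length := List.length_pos_of_ne_nil h
    simp only [List.length_drop] at h1
    omega

theorem pv_sum_const_weight (f : String → Bool) (c : Int) (xs : List String) :
    ((xs.map (fun k => (k, c))).map (fun p => if f p.1 then p.2 else 0)).sum
      = c * (xs.countP f : Int) := by
  induction xs with
  | nil => simp
  | cons x t ih =>
    simp only [List.map_cons, List.sum_cons, List.countP_cons, ih]
    by_cases h : f x = true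
    · rw [if_pos h]; simp [h]; ring
    · rw [if_neg h]; simp [h]

-- ===== VERDICT (by name: the statement is the Claim_ definition above) =====
theorem classify_signal_style_spec : Claim_equal_classify_signal_style := by
  intro signal_name _
  unfold Spec_classify_signal_style classify_signal_style classify_signal_style_alt
  dsimp only
  rw [(pv_outer (PySem.Str.upper signal_name).toList
      (PySem.Str.upper signal_name).toList.length).2]
  have hne : ∀ p ∈ KEYWORD_WEIGHTS, p.1.toList ≠ [] := by decide
  have hrw :
      (KEYWORD_WEIGHTS.map (fun p =>
          if pvHit p.1 (PySem.Str.upper signal_name).toList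
              (PySem.Str.upper signal_name).toList.length then p.2 else 0))
        = (KEYWORD_WEIGHTS.map (fun p =>
            if PySem.Str.isIn p.1 (PySem.Str.upper signal_name) then p.2 else 0)) :=
    List.map_congr_left (fun p hp => by
      rw [pv_hit_eq p.1 _ (hne p hp), PySem.Str.isIn_eq])
  rw [hrw]
  have hsplit : KEYWORD_WEIGHTS
      = MOMENTUM_KEYWORDS.map (fun k => (k, (1 : Int)))
        ++ REVERSAL_KEYWORDS.map (fun k => (k, (-1 : Int))) := rfl
  rw [hsplit, List.map_append, List.sum_append,
    pv_sum_const_weight (fun kw => PySem.Str.isIn kw (PySem.Str.upper signal_name)) 1,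
    pv_sum_const_weight (fun kw => PySem.Str.isIn kw (PySem.Str.upper signal_name)) (-1),
    PySem.List.foldl_if_add_one (p := fun kw => PySem.Str.isIn kw (PySem.Str.upper signal_name)),
    PySem.List.foldl_if_add_one (p := fun kw => PySem.Str.isIn kw (PySem.Str.upper signal_name)),
    one_mul, neg_one_mul]
  split_ifs <;> first | rfl | omega
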